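-- pv_equiv track=rewrite | github.com/clovaai/spade | spade/model/data_utils.py | concat_o_cols
-- ===== SOURCE A (Python) =====
-- def concat_o_cols(adj_mat_fg, cols, o_cols):
--     nr = len(adj_mat_fg[0])
--     nc = len(adj_mat_fg[0][0])
--     n_o_cols = len(o_cols)
--     nnr = nr + n_o_cols
--     nnc = nc + n_o_cols
--
--     new_adj_mat_fg = []
--     for adj_mat1 in adj_mat_fg:
--         new_adj_mat1 = []
--         for row in adj_mat1:
--             new_adj_mat1.append(row + [0] * n_o_cols)
--         for _ in range(n_o_cols):
--             new_adj_mat1.append([0] * nnc)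
--
--         new_adj_mat_fg.append(new_adj_mat1)
--
--     new_cols = cols + o_cols
--     # assert nnr == len(new_adj_mat_fg[0])
--     # assert nnc == len(new_adj_mat_fg[0][0])
--     return new_adj_mat_fg, new_cols
-- ===== SOURCE B (Python) =====
-- def concat_o_cols(adj_mat_fg, cols, o_cols):
--     k = len(o_cols)
--     nnc = len(adj_mat_fg[0][0]) + k
--     new_adj_mat_fg = []
--     for m in adj_mat_fg:
--         # allocate the full padded grid of zeros up front ...
--         grid = [[0] * (len(row) + k) for row in m] + [[0] * nnc for _ in range(k)]
--         # ... then copy the original cells into the top-left block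
--         for i, row in enumerate(m):
--             for j, v in enumerate(row):
--                 grid[i][j] = v
--         new_adj_mat_fg.append(grid)
--     return new_adj_mat_fg, cols + o_cols
-- ===== Notes on version B (the rewrite author's own statement) =====
-- stated objective: alternative
-- what changed: B pre-allocates each padded matrix as a zero grid (per-row widths plus k zero rows) and then fills the original cells into the top-left block by index assignment, instead of A's extend-each-row-then-append-zero-rows construction.
import Mathlib
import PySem

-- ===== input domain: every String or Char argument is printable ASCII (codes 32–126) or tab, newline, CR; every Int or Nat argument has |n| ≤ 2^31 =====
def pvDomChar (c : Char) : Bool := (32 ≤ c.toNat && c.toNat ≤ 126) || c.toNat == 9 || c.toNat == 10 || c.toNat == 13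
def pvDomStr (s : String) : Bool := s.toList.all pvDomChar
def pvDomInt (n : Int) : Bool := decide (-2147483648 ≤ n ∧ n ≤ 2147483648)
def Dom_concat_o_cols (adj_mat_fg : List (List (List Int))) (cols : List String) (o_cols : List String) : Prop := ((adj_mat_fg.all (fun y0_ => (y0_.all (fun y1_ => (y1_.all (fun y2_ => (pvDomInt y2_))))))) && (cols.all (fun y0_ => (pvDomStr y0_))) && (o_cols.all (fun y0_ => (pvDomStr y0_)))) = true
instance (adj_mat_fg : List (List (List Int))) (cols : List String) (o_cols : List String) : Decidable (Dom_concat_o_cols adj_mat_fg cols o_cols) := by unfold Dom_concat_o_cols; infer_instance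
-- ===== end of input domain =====

-- B pre-allocates each padded matrix as a full zero grid and fills the original cells in by
-- index assignment, instead of A's extend-each-row-then-append-zero-rows construction (objective: alternative).

-- ===== PORT A =====
-- A indexes adj_mat_fg[0] and adj_mat_fg[0][0]; Pre_ guarantees both exist, so headD is exact there.
def concat_o_cols (adj_mat_fg : List (List (List Int))) (cols : List String) (o_cols : List String) : List (List (List Int)) × List String :=
  let nr := (adj_mat_fg.headD []).length
  let nc := ((adj_mat_fg.headD []).headD []).length
  let n_o_cols := o_cols.length
  let _nnr := nr + n_o_cols
  let nnc := nc + n_o_cols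
  let new_adj_mat_fg :=
    adj_mat_fg.foldl (fun acc adj_mat1 =>
      acc ++ [(PySem.List.pyRange 0 (n_o_cols : Int) 1).foldl
                (fun a _ => a ++ [List.replicate nnc (0 : Int)])
                (adj_mat1.foldl (fun a row => a ++ [row ++ List.replicate n_o_cols (0 : Int)]) [])]) []
  (new_adj_mat_fg, cols ++ o_cols)

-- ===== PORT B =====
-- transliteration of Source B: allocate a zero grid, then grid[i][j] = v over the original cells
def concat_o_cols_alt (adj_mat_fg : List (List (List Int))) (cols : List String) (o_cols : List String) : List (List (List Int)) × List String :=
  let k := o_cols.length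
  let nnc := ((adj_mat_fg.headD []).headD []).length + k
  let new_adj_mat_fg :=
    adj_mat_fg.foldl (fun acc m =>
      -- allocate the zero grid, then grid[i][j] = v over the original cells
      -- (enumerate indices are always ≥ 0 here, so .toNat is exact)
      acc ++ [(PySem.List.enumerate m 0).foldl (fun g p =>
        (PySem.List.enumerate p.2 0).foldl (fun g2 q =>
          g2.set p.1.toNat ((g2.getD p.1.toNat []).set q.1.toNat q.2)) g)
        (m.map (fun row => List.replicate (row.length + k) (0 : Int))
          ++ (PySem.List.pyRange 0 (k : Int) 1).map (fun _ => List.replicate nnc (0 : Int)))]) []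
  (new_adj_mat_fg, cols ++ o_cols)

-- ===== PRECONDITION & SPEC =====
-- Pre_ excludes exactly the inputs on which A raises IndexError: adj_mat_fg empty or its first matrix empty.
def Pre_concat_o_cols (adj_mat_fg : List (List (List Int))) (cols : List String) (o_cols : List String) : Prop :=
  adj_mat_fg ≠ [] ∧ adj_mat_fg.headD [] ≠ []
instance (adj_mat_fg : List (List (List Int))) (cols : List String) (o_cols : List String) : Decidable (Pre_concat_o_cols adj_mat_fg cols o_cols) := by unfold Pre_concat_o_cols; infer_instance
def pvWitness_concat_o_cols : List (List (List Int)) × List String × List String := ([[[1, 2], [3, 4]]], ["a", "b"], ["x"])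

def Spec_concat_o_cols (adj_mat_fg : List (List (List Int))) (cols : List String) (o_cols : List String) (out : List (List (List Int)) × List String) : Prop := out = concat_o_cols_alt adj_mat_fg cols o_cols
instance (adj_mat_fg : List (List (List Int))) (cols : List String) (o_cols : List String) (out : List (List (List Int)) × List String) : Decidable (Spec_concat_o_cols adj_mat_fg cols o_cols out) := by unfold Spec_concat_o_cols; infer_instance

-- ===== CLAIM (what is proved, stated in full; the proofs are below) =====
def Claim_equal_concat_o_cols : Prop := ∀ (adj_mat_fg : List (List (List Int))) (cols : List String) (o_cols : List String), Dom_concat_o_cols adj_mat_fg cols o_cols → Pre_concat_o_cols adj_mat_fg cols o_cols → Spec_concat_o_cols adj_mat_fg cols o_cols (concat_o_cols adj_mat_fg cols o_cols)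

-- ===== LEMMAS AND PROOFS =====

-- generic: foldl that appends one transformed element per step is a map
theorem pv_foldl_append_sing {α β : Type} (f : α → β) (l : List α) (init : List β) :
    l.foldl (fun a x => a ++ [f x]) init = init ++ l.map f := by
  induction l generalizing init with
  | nil => simp
  | cons x xs ih => simp [List.foldl, ih]

-- filling a row's cells into a prefix region: enumerate-fold of set, offset = pre.length
theorem pv_fillRow (row : List Int) : ∀ (pre r : List Int), row.length ≤ r.length →
    (PySem.List.enumerate row (pre.length : Int)).foldl (fun acc q => acc.set q.1.toNat q.2) (pre ++ r)
      = pre ++ row ++ r.drop row.length := by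
  induction row with
  | nil => intro pre r _; simp [PySem.List.enumerate_nil]
  | cons v row' ih =>
    intro pre r hle
    cases r with
    | nil => simp at hle
    | cons c r' =>
      rw [PySem.List.enumerate_cons]
      simp only [List.foldl_cons]
      have h1 : ((pre.length : Int)).toNat = pre.length := by simp
      have h2 : (pre ++ c :: r').set pre.length v = pre ++ v :: r' := by
        simp
      have h3 : ((pre.length : Int) + 1) = (((pre ++ [v]).length : Nat) : Int) := by
        simp
      rw [h1, h2]
      have h4 : pre ++ v :: r' = (pre ++ [v]) ++ r' := by simp
      rw [h4, h3, ih (pre ++ [v]) r' (by simpa using hle)]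
      simp [List.append_assoc]

-- the inner cell loop at fixed outer index i only rewrites row i
theorem pv_inner_set (row : List Int) : ∀ (s : Int) (g : List (List Int)) (i : Nat), i < g.length →
    (PySem.List.enumerate row s).foldl (fun g2 q => g2.set i ((g2.getD i []).set q.1.toNat q.2)) g
      = g.set i ((PySem.List.enumerate row s).foldl (fun r q => r.set q.1.toNat q.2) (g.getD i [])) := by
  induction row with
  | nil =>
    intro s g i hi
    simp [PySem.List.enumerate_nil, List.getD, List.getElem?_eq_getElem hi]
  | cons v row' ih =>
    intro s g i hi
    rw [PySem.List.enumerate_cons]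
    simp only [List.foldl_cons]
    rw [ih (s + 1) (g.set i ((g.getD i []).set s.toNat v)) i (by simpa using hi)]
    simp [List.getD, hi, List.set_set]

-- the outer fill loop turns the zero grid into the padded matrix
theorem pv_fillGrid (k : Nat) (m : List (List Int)) : ∀ (pre suf : List (List Int)),
    (PySem.List.enumerate m (pre.length : Int)).foldl (fun g p =>
        (PySem.List.enumerate p.2 0).foldl (fun g2 q =>
          g2.set p.1.toNat ((g2.getD p.1.toNat []).set q.1.toNat q.2)) g)
      (pre ++ m.map (fun row => List.replicate (row.length + k) (0 : Int)) ++ suf)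
      = pre ++ m.map (fun row => row ++ List.replicate k (0 : Int)) ++ suf := by
  induction m with
  | nil => intro pre suf; simp [PySem.List.enumerate_nil]
  | cons row m' ih =>
    intro pre suf
    rw [PySem.List.enumerate_cons]
    simp only [List.foldl_cons, List.map_cons]
    have hgrid : pre ++ (List.replicate (row.length + k) (0 : Int)
        :: m'.map (fun row => List.replicate (row.length + k) (0 : Int))) ++ suf
        = pre ++ (List.replicate (row.length + k) (0 : Int)
            :: (m'.map (fun row => List.replicate (row.length + k) (0 : Int)) ++ suf)) := by
      simp
    rw [hgrid]
    rw [pv_inner_set row 0 _ ((pre.length : Int)).toNat (by simp)]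
    have htn : ((pre.length : Int)).toNat = pre.length := by simp
    rw [htn]
    have hgetD : (pre ++ (List.replicate (row.length + k) (0 : Int)
        :: (m'.map (fun row => List.replicate (row.length + k) (0 : Int)) ++ suf))).getD pre.length []
        = List.replicate (row.length + k) (0 : Int) := by
      simp [List.getD]
    rw [hgetD]
    have hrow : (PySem.List.enumerate row 0).foldl (fun r q => r.set q.1.toNat q.2)
        (List.replicate (row.length + k) (0 : Int)) = row ++ List.replicate k (0 : Int) := by
      have := pv_fillRow row [] (List.replicate (row.length + k) (0 : Int)) (by simp)
      simpa using this
    rw [hrow]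
    have hset : (pre ++ (List.replicate (row.length + k) (0 : Int)
        :: (m'.map (fun row => List.replicate (row.length + k) (0 : Int)) ++ suf))).set pre.length
        (row ++ List.replicate k (0 : Int))
        = (pre ++ [row ++ List.replicate k (0 : Int)])
            ++ m'.map (fun row => List.replicate (row.length + k) (0 : Int)) ++ suf := by
      simp
    rw [hset]
    have hs : (pre.length : Int) + 1 = (((pre ++ [row ++ List.replicate k (0 : Int)]).length : Nat) : Int) := by
      simp
    rw [hs, ih (pre ++ [row ++ List.replicate k (0 : Int)]) suf]
    simp

-- each matrix is padded to the same value by the two programs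
theorem pv_matrix (k nnc : Nat) (m : List (List Int)) :
    (PySem.List.pyRange 0 (k : Int) 1).foldl
        (fun a _ => a ++ [List.replicate nnc (0 : Int)])
        (m.foldl (fun a row => a ++ [row ++ List.replicate k (0 : Int)]) [])
      = (PySem.List.enumerate m 0).foldl (fun g p =>
          (PySem.List.enumerate p.2 0).foldl (fun g2 q =>
            g2.set p.1.toNat ((g2.getD p.1.toNat []).set q.1.toNat q.2)) g)
          (m.map (fun row => List.replicate (row.length + k) (0 : Int))
            ++ (PySem.List.pyRange 0 (k : Int) 1).map (fun _ => List.replicate nnc (0 : Int))) := by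
  rw [pv_foldl_append_sing (fun row => row ++ List.replicate k (0 : Int)) m []]
  rw [pv_foldl_append_sing (fun _ => List.replicate nnc (0 : Int)) (PySem.List.pyRange 0 (k : Int) 1)]
  have := pv_fillGrid k m [] ((PySem.List.pyRange 0 (k : Int) 1).map (fun _ => List.replicate nnc (0 : Int)))
  simpa using this.symm

-- ===== VERDICT (by name: the statement is the Claim_ definition above) =====
theorem concat_o_cols_spec : Claim_equal_concat_o_cols := by
  intro adj_mat_fg cols o_cols _ _
  unfold Spec_concat_o_cols concat_o_cols concat_o_cols_alt
  simp only []
  refine Prod.ext ?_ rfl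
  rw [pv_foldl_append_sing, pv_foldl_append_sing]
  simp only [List.nil_append]
  exact List.map_congr_left (fun m _ => pv_matrix o_cols.length
    (((adj_mat_fg.headD []).headD []).length + o_cols.length) m)
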